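-- pv_equiv track=rewrite | github.com/ho991217/Python | BOJ/Algorithm/Div&Conquer/[1992] Quad Tree.py | check
-- ===== SOURCE A (Python) =====
-- def check(arr):
--     isZero = False
--     isOne = False
--
--     if all(1 not in i for i in arr):
--         isZero = True
--     else:
--         isZero = False
--
--     if all(0 not in i for i in arr):
--         isOne = True
--     else:
--         isOne = False
--
--     if isZero:
--         return 0
--     elif isOne:
--         return 1
--     else:
--         return None
-- ===== SOURCE B (Python) =====
-- def check(arr):
--     seen0 = False
--     seen1 = False
--     for row in arr:
--         for x in row:
--             if x == 0:
--                 seen0 = True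
--             elif x == 1:
--                 seen1 = True
--             if seen0 and seen1:
--                 return None
--     return 1 if seen1 else 0
-- ===== Notes on version B (the rewrite author's own statement) =====
-- stated objective: alternative
-- what changed: B makes one fused pass over all elements with two accumulator flags and an early return as soon as both a 0 and a 1 have been seen, instead of A's two staged full scans (first for any 1, then for any 0).
import Mathlib
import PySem

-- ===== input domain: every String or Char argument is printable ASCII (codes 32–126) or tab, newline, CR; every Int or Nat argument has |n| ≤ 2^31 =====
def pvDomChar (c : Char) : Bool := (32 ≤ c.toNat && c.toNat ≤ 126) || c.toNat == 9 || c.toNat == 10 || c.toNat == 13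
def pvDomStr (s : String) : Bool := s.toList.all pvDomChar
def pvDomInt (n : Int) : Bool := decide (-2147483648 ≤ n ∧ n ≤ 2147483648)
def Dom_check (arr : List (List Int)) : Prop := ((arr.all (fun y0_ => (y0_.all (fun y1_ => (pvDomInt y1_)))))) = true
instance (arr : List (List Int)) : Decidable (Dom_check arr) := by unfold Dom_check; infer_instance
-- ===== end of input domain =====

-- B replaces A's two staged full scans by one fused pass with two seen-flags and an early return once both 0 and 1 are found (alternative decomposition; return value proved equal).


-- ===== PORT A =====
-- A: two staged full scans — `all(1 not in i …)` then `all(0 not in i …)` — then the if/elif/else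
def check (arr : List (List Int)) : Option Int :=
  let isZero := arr.all (fun i => !(i.contains 1))
  let isOne := arr.all (fun i => !(i.contains 0))
  if isZero then some 0 else if isOne then some 1 else none

-- ===== PORT B =====
-- inner loop of B: scan one row updating the (seen0, seen1) flags; `none` = the early `return None` fired
def checkAltRow (s0 s1 : Bool) : List Int → Option (Bool × Bool)
  | [] => some (s0, s1)
  | x :: xs =>
    let s0' := if x == 0 then true else s0
    let s1' := if x == 0 then s1 else if x == 1 then true else s1
    if s0' && s1' then none else checkAltRow s0' s1' xs

-- outer loop of B over the rows, threading the flags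
def checkAltRows (s0 s1 : Bool) : List (List Int) → Option (Bool × Bool)
  | [] => some (s0, s1)
  | r :: rs =>
    match checkAltRow s0 s1 r with
    | none => none
    | some (t0, t1) => checkAltRows t0 t1 rs

def check_alt (arr : List (List Int)) : Option Int :=
  match checkAltRows false false arr with
  | none => none
  | some (_, s1) => some (if s1 then 1 else 0)

-- ===== PRECONDITION & SPEC =====
def Spec_check (arr : List (List Int)) (out : Option Int) : Prop := out = check_alt arr
instance (arr : List (List Int)) (out : Option Int) : Decidable (Spec_check arr out) := by unfold Spec_check; infer_instance

-- ===== CLAIM (what is proved, stated in full; the proofs are below) =====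
def Claim_equal_check : Prop := ∀ (arr : List (List Int)), Dom_check arr → Spec_check arr (check arr)

-- ===== LEMMAS AND PROOFS =====
-- B's inner loop computes the OR of the incoming flags with the row's 0/1 occurrences, `none` iff both end up set
theorem checkAltRow_eq (row : List Int) : ∀ (s0 s1 : Bool), ¬ (s0 = true ∧ s1 = true) →
    checkAltRow s0 s1 row =
      (if (s0 = true ∨ (0:Int) ∈ row) ∧ (s1 = true ∨ (1:Int) ∈ row) then none
       else some (s0 || decide ((0:Int) ∈ row), s1 || decide ((1:Int) ∈ row))) := by
  induction row with
  | nil => intro s0 s1 h; cases s0 <;> cases s1 <;> simp_all [checkAltRow]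
  | cons x xs ih =>
    intro s0 s1 h
    by_cases hx0 : x = 0
    · subst hx0
      cases s1 with
      | false => simp [checkAltRow, ih true false (by simp)]
      | true =>
        cases s0 with
        | false => simp [checkAltRow]
        | true => simp at h
    · by_cases hx1 : x = 1
      · subst hx1
        cases s0 with
        | false => simp [checkAltRow, ih false true (by simp)]
        | true =>
          cases s1 with
          | false => simp [checkAltRow]
          | true => simp at h
      · have h0 : ((x == (0:Int)) : Bool) = false := by simp [hx0]
        have h1 : ((x == (1:Int)) : Bool) = false := by simp [hx1]
        simp [checkAltRow, h0, h1, ih s0 s1 h, Ne.symm hx0, Ne.symm hx1]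
        intro hs0 hs1; exact absurd ⟨hs0, hs1⟩ h

-- B's outer loop: the same invariant lifted to the list of rows
theorem checkAltRows_eq (rs : List (List Int)) : ∀ (s0 s1 : Bool), ¬ (s0 = true ∧ s1 = true) →
    checkAltRows s0 s1 rs =
      (if (s0 = true ∨ ∃ r ∈ rs, (0:Int) ∈ r) ∧ (s1 = true ∨ ∃ r ∈ rs, (1:Int) ∈ r) then none
       else some (s0 || rs.any (fun r => decide ((0:Int) ∈ r)), s1 || rs.any (fun r => decide ((1:Int) ∈ r)))) := by
  induction rs with
  | nil => intro s0 s1 h; cases s0 <;> cases s1 <;> simp_all [checkAltRows]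
  | cons r rs ih =>
    intro s0 s1 h
    rw [checkAltRows, checkAltRow_eq r s0 s1 h]
    by_cases hb : (s0 = true ∨ (0:Int) ∈ r) ∧ (s1 = true ∨ (1:Int) ∈ r)
    · rw [if_pos hb]
      rw [if_pos (by exact ⟨hb.1.imp id (fun hr => ⟨r, by simp, hr⟩), hb.2.imp id (fun hr => ⟨r, by simp, hr⟩)⟩)]
    · rw [if_neg hb]
      have h' : ¬ ((s0 || decide ((0:Int) ∈ r)) = true ∧ (s1 || decide ((1:Int) ∈ r)) = true) := by
        simpa using hb
      simp only [ih _ _ h']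
      have e0 : ((s0 || decide ((0:Int) ∈ r)) = true ∨ ∃ x ∈ rs, (0:Int) ∈ x) ↔
          (s0 = true ∨ ∃ x ∈ r :: rs, (0:Int) ∈ x) := by
        simp [or_assoc]
      have e1 : ((s1 || decide ((1:Int) ∈ r)) = true ∨ ∃ x ∈ rs, (1:Int) ∈ x) ↔
          (s1 = true ∨ ∃ x ∈ r :: rs, (1:Int) ∈ x) := by
        simp [or_assoc]
      rw [if_congr (and_congr e0 e1) rfl rfl]
      simp [Bool.or_assoc]

theorem check_spec_main (arr : List (List Int)) : check arr = check_alt arr := by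
  unfold check check_alt
  rw [checkAltRows_eq arr false false (by simp)]
  by_cases h0 : ∃ r ∈ arr, (0:Int) ∈ r <;> by_cases h1 : ∃ r ∈ arr, (1:Int) ∈ r <;>
    simp_all [List.all_eq_true]
  -- h0 : ∃ 0, h1 : ∃ 1 — both sides none
  · obtain ⟨ra, hra, ha⟩ := h0
    obtain ⟨rb, hrb, hb⟩ := h1
    rw [if_neg (fun hall => hall rb hrb hb), if_neg (fun hall => hall ra hra ha)]
  -- h0 : ∃ 0, h1 : no 1 — both sides some 0
  · have hc : ¬ ∃ r ∈ arr, (1:Int) ∈ r := by rintro ⟨r, hr, hx⟩; exact h1 r hr hx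
    rw [if_neg hc]
    have a1 : (arr.any fun r => decide ((1:Int) ∈ r)) = false := by
      simp only [List.any_eq_false]; intro x hx; simpa using h1 x hx
    simp [a1]
  -- h0 : no 0, h1 : ∃ 1 — both sides some 1
  · obtain ⟨rb, hrb, hb⟩ := h1
    rw [if_neg (fun hall => hall rb hrb hb)]
    have hc : ¬ ∃ r ∈ arr, (0:Int) ∈ r := by rintro ⟨r, hr, hx⟩; exact h0 r hr hx
    rw [if_neg hc]
    have a1 : (arr.any fun r => decide ((1:Int) ∈ r)) = true := by
      simp only [List.any_eq_true, decide_eq_true_eq]; exact ⟨rb, hrb, hb⟩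
    simp [a1]
  -- neither occurs — both sides some 0
  · have hc : ¬ ((∃ r ∈ arr, (0:Int) ∈ r) ∧ ∃ r ∈ arr, (1:Int) ∈ r) := by
      rintro ⟨⟨r, hr, hx⟩, -⟩; exact h0 r hr hx
    rw [if_neg hc]
    have a1 : (arr.any fun r => decide ((1:Int) ∈ r)) = false := by
      simp only [List.any_eq_false]; intro x hx; simpa using h1 x hx
    simp [a1]

-- ===== VERDICT (by name: the statement is the Claim_ definition above) =====
theorem check_spec : Claim_equal_check := by
  intro arr _
  unfold Spec_check
  exact check_spec_main arr
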